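-- pv_equiv track=rewrite | github.com/zacinC/DomaciZadaci | drugi_domaci/domaci2.py | suma_i_broj_djeljivih
-- ===== SOURCE A (Python) =====
-- def suma_i_broj_djeljivih(a, b, djelilac):
--     suma = 0
--     broj_djeljivih = 0
--     for broj in range(a+1, b):
--         if broj % djelilac == 0:
--             suma += broj
--             broj_djeljivih += 1
--     return suma, broj_djeljivih
-- ===== SOURCE B (Python) =====
-- def suma_i_broj_djeljivih(a, b, djelilac):
--     lo, hi = a + 1, b - 1
--     if lo > hi:
--         return 0, 0
--     m = abs(djelilac)
--     k1 = (lo - 1) // m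
--     k2 = hi // m
--     return m * (k2 * (k2 + 1) // 2 - k1 * (k1 + 1) // 2), k2 - k1
-- ===== Notes on version B (the rewrite author's own statement) =====
-- stated objective: faster
-- what changed: Replaced the O(b-a) loop over range(a+1,b) with O(1) closed-form arithmetic: count and sum of multiples of |djelilac| in the open interval via floor divisions and triangular numbers.
import Mathlib
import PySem

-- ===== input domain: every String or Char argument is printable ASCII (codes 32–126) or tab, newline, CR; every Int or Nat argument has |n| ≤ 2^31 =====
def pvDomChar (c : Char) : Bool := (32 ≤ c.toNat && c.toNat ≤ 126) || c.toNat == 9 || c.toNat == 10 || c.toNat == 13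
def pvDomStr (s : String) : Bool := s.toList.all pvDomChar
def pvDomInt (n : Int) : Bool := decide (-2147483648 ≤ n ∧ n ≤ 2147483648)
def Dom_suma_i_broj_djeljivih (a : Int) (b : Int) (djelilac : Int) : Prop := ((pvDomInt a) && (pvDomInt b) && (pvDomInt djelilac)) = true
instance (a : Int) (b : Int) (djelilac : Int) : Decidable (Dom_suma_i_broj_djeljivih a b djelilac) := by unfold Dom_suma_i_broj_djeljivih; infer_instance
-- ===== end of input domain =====

-- B replaces A's linear loop by O(1) closed-form arithmetic (floor divisions and
-- triangular numbers); equivalence is about the returned pair (as a 2-element list).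

-- ===== PORT A =====
def suma_i_broj_djeljivih (a : Int) (b : Int) (djelilac : Int) : List Int :=
  let st := (PySem.List.pyRange (a + 1) b 1).foldl
    (fun (st : Int × Int) broj =>
      if PySem.Int.mod broj djelilac = 0 then (st.1 + broj, st.2 + 1) else st)
    (0, 0)
  [st.1, st.2]

-- ===== PORT B =====
def suma_i_broj_djeljivih_alt (a : Int) (b : Int) (djelilac : Int) : List Int :=
  let lo := a + 1
  let hi := b - 1
  if lo > hi then [0, 0]
  else
    let m : Int := |djelilac|
    let k1 := PySem.Int.floordiv (lo - 1) m
    let k2 := PySem.Int.floordiv hi m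
    [m * (PySem.Int.floordiv (k2 * (k2 + 1)) 2 - PySem.Int.floordiv (k1 * (k1 + 1)) 2), k2 - k1]

-- ===== PRECONDITION & SPEC =====
-- Pre_ excludes exactly the inputs where Python A raises ZeroDivisionError
-- (djelilac = 0 with a nonempty range); B raises there too.
def Pre_suma_i_broj_djeljivih (a : Int) (b : Int) (djelilac : Int) : Prop :=
  djelilac ≠ 0 ∨ b ≤ a + 1
instance (a : Int) (b : Int) (djelilac : Int) : Decidable (Pre_suma_i_broj_djeljivih a b djelilac) := by unfold Pre_suma_i_broj_djeljivih; infer_instance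

def pvWitness_suma_i_broj_djeljivih : Int × Int × Int := (0, 10, 3)

def Spec_suma_i_broj_djeljivih (a : Int) (b : Int) (djelilac : Int) (out : List Int) : Prop := out = suma_i_broj_djeljivih_alt a b djelilac
instance (a : Int) (b : Int) (djelilac : Int) (out : List Int) : Decidable (Spec_suma_i_broj_djeljivih a b djelilac out) := by unfold Spec_suma_i_broj_djeljivih; infer_instance

-- ===== CLAIM (what is proved, stated in full; the proofs are below) =====
def Claim_equal_suma_i_broj_djeljivih : Prop := ∀ (a : Int) (b : Int) (djelilac : Int), Dom_suma_i_broj_djeljivih a b djelilac → Pre_suma_i_broj_djeljivih a b djelilac → Spec_suma_i_broj_djeljivih a b djelilac (suma_i_broj_djeljivih a b djelilac)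

-- ===== LEMMAS AND PROOFS =====

/-- Triangular number `k*(k+1)/2` (exact: the numerator is even). -/
def pvTri (k : Int) : Int := (k * (k + 1)) / 2

theorem pvTri_succ (k : Int) : pvTri (k + 1) = pvTri k + (k + 1) := by
  unfold pvTri
  have h : (k + 1) * (k + 1 + 1) = k * (k + 1) + (k + 1) * 2 := by ring
  rw [h, Int.add_mul_ediv_right _ _ (by norm_num : (2:Int) ≠ 0)]

/-- For m > 0: floor division of lo-1 steps down exactly at multiples of m. -/
theorem pv_ediv_sub_one_dvd {m lo : Int} (hm : 0 < m) (h : m ∣ lo) :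
    (lo - 1) / m = lo / m - 1 := by
  obtain ⟨q, hq⟩ := h
  have hq' : lo / m = q := by rw [hq]; exact Int.mul_ediv_cancel_left q (by omega)
  have : lo - 1 = (m - 1) + (q - 1) * m := by rw [hq]; ring
  rw [this, Int.add_mul_ediv_right _ _ (by omega : m ≠ 0),
    Int.ediv_eq_zero_of_lt (by omega) (by omega)]
  omega

theorem pv_ediv_sub_one_not_dvd {m lo : Int} (hm : 0 < m) (h : ¬ m ∣ lo) :
    (lo - 1) / m = lo / m := by
  have h0 : 0 ≤ lo % m := Int.emod_nonneg lo (by omega)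
  have h1 : lo % m < m := Int.emod_lt_of_pos lo hm
  have hne : lo % m ≠ 0 := fun hz => h (Int.dvd_of_emod_eq_zero hz)
  have : lo - 1 = (lo % m - 1) + (lo / m) * m := by
    linarith [Int.mul_ediv_add_emod lo m, mul_comm m (lo / m)]
  rw [this, Int.add_mul_ediv_right _ _ (by omega : m ≠ 0),
    Int.ediv_eq_zero_of_lt (by omega) (by omega)]
  omega

/-- Loop invariant: the fold over `pyRange lo e 1` adds the closed-form sum and count
of multiples of `|d|` in `[lo, e)` to the accumulator. -/
theorem pv_loop (d : Int) (hd : d ≠ 0) :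
    ∀ (n : Nat) (lo e : Int), (e - lo).toNat = n → lo ≤ e → ∀ s c : Int,
    (PySem.List.pyRange lo e 1).foldl
      (fun (st : Int × Int) broj =>
        if PySem.Int.mod broj d = 0 then (st.1 + broj, st.2 + 1) else st) (s, c)
    = (s + |d| * pvTri ((e - 1) / |d|) - |d| * pvTri ((lo - 1) / |d|),
       c + (e - 1) / |d| - (lo - 1) / |d|) := by
  intro n
  induction n with
  | zero =>
    intro lo e hn hle s c
    have he : e = lo := by omega
    subst he
    rw [PySem.List.pyRange_one_eq_nil le_rfl]
    simp [List.foldl]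
  | succ k ih =>
    intro lo e hn _ s c
    have hlt : lo < e := by omega
    have hm : 0 < |d| := abs_pos.mpr hd
    rw [PySem.List.pyRange_one_cons hlt, List.foldl_cons]
    have hcond : (PySem.Int.mod lo d = 0) ↔ (|d| ∣ lo) := by
      rw [PySem.Int.mod_eq_zero_iff_dvd]; exact (abs_dvd d lo).symm
    by_cases hdvd : |d| ∣ lo
    · rw [if_pos (hcond.mpr hdvd)]
      rw [ih (lo + 1) e (by omega) (by omega) (s + lo) (c + 1)]
      have hstep : lo / |d| = (lo - 1) / |d| + 1 := by
        have := pv_ediv_sub_one_dvd hm hdvd; omega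
      have hself : |d| * (lo / |d|) = lo := Int.mul_ediv_cancel' hdvd
      have htri : pvTri (lo / |d|) = pvTri ((lo - 1) / |d|) + ((lo - 1) / |d| + 1) := by
        rw [hstep]; exact pvTri_succ _
      have hkey : |d| * pvTri (lo / |d|) = |d| * pvTri ((lo - 1) / |d|) + lo := by
        rw [htri, mul_add, ← hstep, hself]
      rw [show lo + 1 - 1 = lo by ring, Prod.mk.injEq]
      exact ⟨by linarith [hkey], by linarith [hstep]⟩
    · rw [if_neg (fun hc => hdvd (hcond.mp hc))]
      rw [ih (lo + 1) e (by omega) (by omega) s c]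
      have hstep : (lo - 1) / |d| = lo / |d| := pv_ediv_sub_one_not_dvd hm hdvd
      rw [show lo + 1 - 1 = lo by ring, hstep]

-- ===== VERDICT (by name: the statement is the Claim_ definition above) =====
theorem suma_i_broj_djeljivih_spec : Claim_equal_suma_i_broj_djeljivih := by
  intro a b d _ hpre
  unfold Spec_suma_i_broj_djeljivih suma_i_broj_djeljivih suma_i_broj_djeljivih_alt
  by_cases hle : b - 1 < a + 1
  · rw [if_pos hle, PySem.List.pyRange_one_eq_nil (by omega)]
    simp [List.foldl]
  · rw [if_neg hle]
    have hd : d ≠ 0 := by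
      rcases hpre with h | h
      · exact h
      · omega
    have hm : 0 < |d| := abs_pos.mpr hd
    rw [pv_loop d hd (b - (a + 1)).toNat (a + 1) b rfl (by omega) 0 0]
    simp only [PySem.Int.floordiv_eq_ediv_of_pos hm,
      PySem.Int.floordiv_eq_ediv_of_pos (by norm_num : (0:Int) < 2)]
    have h1 : a + 1 - 1 = a := by ring
    rw [h1]
    unfold pvTri
    simp only [List.cons.injEq, and_true]
    constructor
    · ring
    · omega
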